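-- pv_equiv track=rewrite | github.com/neerjamhaskar/Rkt-LCS | helper/find_max_common_substrings.py | find_maximal_common_substrings
-- ===== SOURCE A (Python) =====
-- def hamming_distance(s1, s2):
--     return sum(a != b for a, b in zip(s1, s2))
--
-- def find_maximal_common_substrings(s1, s2, k, tau):
--     max_subs = []
--     len1, len2 = len(s1), len(s2)
--
--     for i in range(len1):
--         for j in range(len2):
--             mismatches = 0
--             l = 0
--             max_len = min(len1 - i, len2 - j)
--
--             while l < max_len:
--                 if s1[i + l] != s2[j + l]:
--                     mismatches += 1
--                     if mismatches > k:
--                         break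
--                 l += 1
--
--             if l < tau:
--                 continue
--
--             # Maximality: check if 1-char extension stays within k mismatches
--             left_mismatch = (
--                 i > 0 and j > 0 and
--                 hamming_distance(s1[i - 1:i + l], s2[j - 1:j + l]) <= k
--             )
--             right_mismatch = (
--                 i + l < len1 and j + l < len2 and
--                 hamming_distance(s1[i:i + l + 1], s2[j:j + l + 1]) <= k
--             )
--
--             if not left_mismatch and not right_mismatch:
--                 substr1 = s1[i:i + l]
--                 substr2 = s2[j:j + l]
--                 max_subs.append((i, j, l, substr1, substr2))
--
--     return max_subs
-- ===== SOURCE B (Python) =====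
-- def find_maximal_common_substrings(s1, s2, k, tau):
--     # Diagonal decomposition: for each diagonal d = i - j precompute the list M of
--     # mismatch offsets and prefix mismatch counts C once; then every start pair
--     # (i, j) is answered in O(1) (l = offset of the (k+1)-th mismatch after the
--     # start, or the diagonal end).  l is right-maximal by construction, so only
--     # the left extension needs checking.
--     len1, len2 = len(s1), len(s2)
--     kk = k if k > 0 else 0
--     diag = {}
--     for d in range(-len2 + 1, len1):
--         i0 = d if d >= 0 else 0
--         j0 = 0 if d >= 0 else -d
--         L = min(len1 - i0, len2 - j0)
--         M = []
--         C = [0]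
--         c = 0
--         for p in range(L):
--             if s1[i0 + p] != s2[j0 + p]:
--                 M.append(p)
--                 c += 1
--             C.append(c)
--         diag[d] = (M, C)
--     res = []
--     for i in range(len1):
--         for j in range(len2):
--             t = j if i - j >= 0 else i
--             M, C = diag[i - j]
--             L = len(C) - 1
--             idx = C[t]
--             if idx + kk < len(M):
--                 l = M[idx + kk] - t
--                 m = kk
--             else:
--                 l = L - t
--                 m = len(M) - idx
--             if l < tau:
--                 continue
--             if i > 0 and j > 0 and m + (s1[i - 1] != s2[j - 1]) <= k:
--                 continue
--             res.append((i, j, l, s1[i:i + l], s2[j:j + l]))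
--     return res
-- ===== Notes on version B (the rewrite author's own statement) =====
-- stated objective: faster
-- what changed: B decomposes the problem by diagonals: it precomputes, per diagonal i-j, the list of mismatch offsets and prefix mismatch counts once, then answers every start pair (i,j) in O(1) (the (k+1)-th mismatch after the start gives the match length, which is right-maximal by construction, so only the left extension is checked), instead of A's per-pair character scan plus two hamming rescans.
import Mathlib
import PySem

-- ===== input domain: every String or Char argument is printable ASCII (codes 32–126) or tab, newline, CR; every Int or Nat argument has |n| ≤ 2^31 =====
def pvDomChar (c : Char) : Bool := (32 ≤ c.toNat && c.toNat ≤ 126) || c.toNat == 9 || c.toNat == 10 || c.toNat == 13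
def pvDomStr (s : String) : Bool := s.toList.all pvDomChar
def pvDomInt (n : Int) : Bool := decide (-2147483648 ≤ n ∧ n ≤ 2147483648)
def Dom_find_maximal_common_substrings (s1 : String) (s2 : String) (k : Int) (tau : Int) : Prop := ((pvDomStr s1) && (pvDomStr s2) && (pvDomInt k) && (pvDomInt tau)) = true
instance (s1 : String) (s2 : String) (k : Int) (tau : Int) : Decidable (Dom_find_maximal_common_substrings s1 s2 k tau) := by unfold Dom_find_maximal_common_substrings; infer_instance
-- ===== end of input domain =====

-- B replaces A's per-pair character scan (plus two hamming rescans) by per-diagonal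
-- mismatch-offset/prefix-count tables built once, answering each start pair in O(1);
-- objective: faster (asymptotically fewer character comparisons).

-- ===== PORT A =====

-- sum(a != b for a, b in zip(s1, s2))
def pvHamming (x y : String) : Int :=
  ((x.toList.zip y.toList).map (fun p => if p.1 ≠ p.2 then (1 : Int) else 0)).sum

-- A's inner `while l < max_len: …` loop; pyGetD is exact here because the loop
-- guard keeps i+l / j+l in range.
def pvWhileA (c1 c2 : List Char) (k mism l : Int) (i j maxlen : Int) : Int :=
  if _h : l < maxlen then
    if PySem.List.pyGetD c1 (i + l) ' ' ≠ PySem.List.pyGetD c2 (j + l) ' ' then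
      if mism + 1 > k then l
      else pvWhileA c1 c2 k (mism + 1) (l + 1) i j maxlen
    else pvWhileA c1 c2 k mism (l + 1) i j maxlen
  else l
termination_by (maxlen - l).toNat
decreasing_by all_goals omega

def find_maximal_common_substrings (s1 : String) (s2 : String) (k : Int) (tau : Int) : List (Int × Int × Int × String × String) :=
  let c1 := s1.toList
  let c2 := s2.toList
  let len1 : Int := c1.length
  let len2 : Int := c2.length
  (PySem.List.pyRange 0 len1 1).foldl (fun acc i =>
    (PySem.List.pyRange 0 len2 1).foldl (fun acc j =>
      let maxLen := min (len1 - i) (len2 - j)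
      let l := pvWhileA c1 c2 k 0 0 i j maxLen
      if l < tau then acc
      else
        let leftMismatch := decide (0 < i) && decide (0 < j) &&
          decide (pvHamming (PySem.Str.slice s1 (some (i - 1)) (some (i + l)))
                            (PySem.Str.slice s2 (some (j - 1)) (some (j + l))) ≤ k)
        let rightMismatch := decide (i + l < len1) && decide (j + l < len2) &&
          decide (pvHamming (PySem.Str.slice s1 (some i) (some (i + l + 1)))
                            (PySem.Str.slice s2 (some j) (some (j + l + 1))) ≤ k)
        if !leftMismatch && !rightMismatch then
          acc ++ [(i, j, l, PySem.Str.slice s1 (some i) (some (i + l)),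
                            PySem.Str.slice s2 (some j) (some (j + l)))]
        else acc) acc) []

-- ===== PORT B =====

-- _diag_tables of Source B: per diagonal d = i - j, the mismatch offsets M and the
-- prefix mismatch counts C (C has length L+1).
def pvBuildDiag (c1 c2 : List Char) : PySem.Dict Int (List Int × List Int) :=
  let len1 : Int := c1.length
  let len2 : Int := c2.length
  (PySem.List.pyRange (-len2 + 1) len1 1).foldl (fun dd d =>
    let i0 : Int := if d ≥ 0 then d else 0
    let j0 : Int := if d ≥ 0 then 0 else -d
    let L := min (len1 - i0) (len2 - j0)
    let mcc := (PySem.List.pyRange 0 L 1).foldl (fun (s : List Int × List Int × Int) p =>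
      if PySem.List.pyGetD c1 (i0 + p) ' ' ≠ PySem.List.pyGetD c2 (j0 + p) ' ' then
        (s.1 ++ [p], s.2.1 ++ [s.2.2 + 1], s.2.2 + 1)
      else (s.1, s.2.1 ++ [s.2.2], s.2.2)) ([], [0], 0)
    dd.insert d (mcc.1, mcc.2.1)) PySem.Dict.empty

def find_maximal_common_substrings_alt (s1 : String) (s2 : String) (k : Int) (tau : Int) : List (Int × Int × Int × String × String) :=
  let c1 := s1.toList
  let c2 := s2.toList
  let len1 : Int := c1.length
  let len2 : Int := c2.length
  let kk : Int := if k > 0 then k else 0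
  let diag := pvBuildDiag c1 c2
  (PySem.List.pyRange 0 len1 1).foldl (fun acc i =>
    (PySem.List.pyRange 0 len2 1).foldl (fun acc j =>
      let t : Int := if i - j ≥ 0 then j else i
      let MC := diag.getD (i - j) ([], [])
      let L : Int := (MC.2.length : Int) - 1
      let idx := PySem.List.pyGetD MC.2 t 0
      let lm : Int × Int :=
        if idx + kk < (MC.1.length : Int) then (PySem.List.pyGetD MC.1 (idx + kk) 0 - t, kk)
        else (L - t, (MC.1.length : Int) - idx)
      if lm.1 < tau then acc
      else if decide (0 < i) && decide (0 < j) &&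
            decide (lm.2 + (if PySem.List.pyGetD c1 (i - 1) ' ' ≠ PySem.List.pyGetD c2 (j - 1) ' '
                            then (1 : Int) else 0) ≤ k) then acc
      else
        acc ++ [(i, j, lm.1, PySem.Str.slice s1 (some i) (some (i + lm.1)),
                             PySem.Str.slice s2 (some j) (some (j + lm.1)))]) acc) []

-- ===== PRECONDITION & SPEC =====
def Spec_find_maximal_common_substrings (s1 : String) (s2 : String) (k : Int) (tau : Int) (out : List (Int × Int × Int × String × String)) : Prop := out = find_maximal_common_substrings_alt s1 s2 k tau
instance (s1 : String) (s2 : String) (k : Int) (tau : Int) (out : List (Int × Int × Int × String × String)) : Decidable (Spec_find_maximal_common_substrings s1 s2 k tau out) := by unfold Spec_find_maximal_common_substrings; infer_instance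

-- ===== CLAIM (what is proved, stated in full; the proofs are below) =====
def Claim_equal_find_maximal_common_substrings : Prop := ∀ (s1 : String) (s2 : String) (k : Int) (tau : Int), Dom_find_maximal_common_substrings s1 s2 k tau → Spec_find_maximal_common_substrings s1 s2 k tau (find_maximal_common_substrings s1 s2 k tau)

-- ===== LEMMAS AND PROOFS =====

-- mismatch count of a zipped window
def pvCnt (z : List (Char × Char)) : Nat := z.countP (fun p => !decide (p.1 = p.2))

-- length of the longest prefix of z containing ≤ n mismatches, stopping at the
-- (n+1)-th mismatch (the value A's while loop computes)
def pvG : List (Char × Char) → Nat → Nat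
  | [], _ => 0
  | p :: rest, n =>
    if p.1 = p.2 then 1 + pvG rest n
    else match n with
      | 0 => 0
      | n + 1 => 1 + pvG rest n

-- mismatch offsets of z, numbered from q
def pvOffs : List (Char × Char) → Int → List Int
  | [], _ => []
  | p :: rest, q => if p.1 = p.2 then pvOffs rest (q + 1) else q :: pvOffs rest (q + 1)

-- running mismatch counts of z starting from c (one entry per position)
def pvPC : List (Char × Char) → Int → List Int
  | [], _ => []
  | p :: rest, c =>
    (if p.1 = p.2 then c else c + 1) :: pvPC rest (if p.1 = p.2 then c else c + 1)

theorem pv_zip_drop (n : Nat) (as bs : List Char) :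
    (as.zip bs).drop n = (as.drop n).zip (bs.drop n) := by
  induction n generalizing as bs with
  | zero => simp
  | succ n ih =>
    cases as with
    | nil => simp
    | cons a as =>
      cases bs with
      | nil => simp
      | cons b bs => simpa using ih as bs

theorem pv_zip_take (n : Nat) (as bs : List Char) :
    (as.zip bs).take n = (as.take n).zip (bs.take n) := by
  induction n generalizing as bs with
  | zero => simp
  | succ n ih =>
    cases as with
    | nil => simp
    | cons a as =>
      cases bs with
      | nil => simp
      | cons b bs => simpa using ih as bs

theorem pvG_le_length (z : List (Char × Char)) (n : Nat) : pvG z n ≤ z.length := by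
  induction z generalizing n with
  | nil => simp [pvG]
  | cons p rest ih =>
    by_cases h : p.1 = p.2
    · simp only [pvG, if_pos h, List.length_cons]
      have := ih n; omega
    · cases n with
      | zero => simp [pvG, h]
      | succ n =>
        simp only [pvG, if_neg h, List.length_cons]
        have := ih n; omega

theorem pvG_of_cnt_le (z : List (Char × Char)) (n : Nat) (h : pvCnt z ≤ n) :
    pvG z n = z.length := by
  induction z generalizing n with
  | nil => simp [pvG]
  | cons p rest ih =>
    by_cases hp : p.1 = p.2
    · simp only [pvCnt, List.countP_cons] at h
      simp only [pvG, if_pos hp, List.length_cons]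
      rw [ih n (by simpa [pvCnt, hp] using h)]
      omega
    · simp only [pvCnt, List.countP_cons] at h
      have h' : pvCnt rest + 1 ≤ n := by simpa [pvCnt, hp] using h
      cases n with
      | zero => omega
      | succ n =>
        simp only [pvG, if_neg hp, List.length_cons]
        rw [ih n (by omega)]
        omega

theorem pvCnt_take_pvG (z : List (Char × Char)) (n : Nat) :
    pvCnt (z.take (pvG z n)) = min n (pvCnt z) := by
  induction z generalizing n with
  | nil => simp [pvG, pvCnt]
  | cons p rest ih =>
    by_cases hp : p.1 = p.2
    · simp only [pvG, if_pos hp]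
      have : (1 + pvG rest n) = pvG rest n + 1 := by omega
      rw [this]
      simp only [List.take_succ_cons, pvCnt, List.countP_cons]
      have := ih n
      simp only [pvCnt] at this
      simp [hp, this]
    · cases n with
      | zero => simp [pvG, hp, pvCnt]
      | succ n =>
        simp only [pvG, if_neg hp]
        have : (1 + pvG rest n) = pvG rest n + 1 := by omega
        rw [this]
        simp only [List.take_succ_cons, pvCnt, List.countP_cons]
        have := ih n
        simp only [pvCnt] at this
        simp [hp, this]

theorem pvCnt_take_pvG_succ (z : List (Char × Char)) (n : Nat) (h : n < pvCnt z) :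
    pvCnt (z.take (pvG z n + 1)) = n + 1 := by
  induction z generalizing n with
  | nil => simp [pvCnt] at h
  | cons p rest ih =>
    by_cases hp : p.1 = p.2
    · have h' : n < pvCnt rest := by simpa [pvCnt, hp] using h
      simp only [pvG, if_pos hp]
      have e : (1 + pvG rest n + 1) = (pvG rest n + 1) + 1 := by omega
      rw [e]
      simp only [List.take_succ_cons, pvCnt, List.countP_cons]
      have := ih n h'
      simp only [pvCnt] at this
      simp [hp, this]
    · cases n with
      | zero =>
        simp [pvG, hp, pvCnt]
      | succ n =>
        have h' : n < pvCnt rest := by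
          simp only [pvCnt, List.countP_cons] at h ⊢
          simp [hp] at h
          omega
        simp only [pvG, if_neg hp]
        have e : (1 + pvG rest n + 1) = (pvG rest n + 1) + 1 := by omega
        rw [e]
        simp only [List.take_succ_cons, pvCnt, List.countP_cons]
        have := ih n h'
        simp only [pvCnt] at this
        simp [hp, this]

theorem pvOffs_length (z : List (Char × Char)) (q : Int) : (pvOffs z q).length = pvCnt z := by
  induction z generalizing q with
  | nil => simp [pvOffs, pvCnt]
  | cons p rest ih =>
    by_cases hp : p.1 = p.2
    · simp only [pvOffs, if_pos hp, pvCnt, List.countP_cons]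
      have := ih (q + 1)
      simp only [pvCnt] at this
      simp [hp, this]
    · simp only [pvOffs, if_neg hp, List.length_cons, pvCnt, List.countP_cons]
      have := ih (q + 1)
      simp only [pvCnt] at this
      simp [hp, this]

theorem pvOffs_append (u v : List (Char × Char)) (q : Int) :
    pvOffs (u ++ v) q = pvOffs u q ++ pvOffs v (q + u.length) := by
  induction u generalizing q with
  | nil => simp [pvOffs]
  | cons p rest ih =>
    by_cases hp : p.1 = p.2
    · simp only [List.cons_append, pvOffs, if_pos hp, ih, List.length_cons]
      congr 2
      push_cast
      ring
    · simp only [List.cons_append, pvOffs, if_neg hp, ih, List.length_cons, List.cons_append]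
      congr 3
      push_cast
      ring

theorem pvOffs_getElem? (z : List (Char × Char)) (q : Int) (n : Nat) (h : n < pvCnt z) :
    (pvOffs z q)[n]? = some (q + (pvG z n : Int)) := by
  induction z generalizing q n with
  | nil => simp [pvCnt] at h
  | cons p rest ih =>
    by_cases hp : p.1 = p.2
    · have h' : n < pvCnt rest := by simpa [pvCnt, hp] using h
      simp only [pvOffs, if_pos hp, pvG]
      rw [ih (q + 1) n h']
      congr 1
      push_cast
      ring
    · cases n with
      | zero => simp [pvOffs, hp, pvG]
      | succ n =>
        have h' : n < pvCnt rest := by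
          simp only [pvCnt, List.countP_cons] at h ⊢
          simp [hp] at h
          omega
        simp only [pvOffs, if_neg hp, pvG, List.getElem?_cons_succ]
        rw [ih (q + 1) n h']
        congr 1
        push_cast
        ring

theorem pvPC_length (z : List (Char × Char)) (c : Int) : (pvPC z c).length = z.length := by
  induction z generalizing c with
  | nil => simp [pvPC]
  | cons p rest ih => simp [pvPC, ih]

theorem pvPC_getElem? (z : List (Char × Char)) (c : Int) (t : Nat) (h : t < z.length) :
    (pvPC z c)[t]? = some (c + (pvCnt (z.take (t + 1)) : Int)) := by
  induction z generalizing c t with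
  | nil => simp at h
  | cons p rest ih =>
    cases t with
    | zero =>
      by_cases hp : p.1 = p.2 <;> simp [pvPC, hp, pvCnt]
    | succ t =>
      have h' : t < rest.length := by simpa using h
      by_cases hp : p.1 = p.2
      · simp only [pvPC, if_pos hp, List.getElem?_cons_succ]
        rw [ih c t h']
        simp only [List.take_succ_cons, pvCnt, List.countP_cons]
        simp [hp]
      · simp only [pvPC, if_neg hp, List.getElem?_cons_succ]
        rw [ih (c + 1) t h']
        simp only [List.take_succ_cons, pvCnt, List.countP_cons]
        simp [hp]
        push_cast
        ring

theorem pvHamming_eq (x y : String) :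
    pvHamming x y = (pvCnt (x.toList.zip y.toList) : Int) := by
  unfold pvHamming pvCnt
  have := PySem.List.sum_map_ite_one_zero (fun p : Char × Char => decide (p.1 ≠ p.2))
    (x.toList.zip y.toList)
  simpa using this

theorem pvWhileA_eq (c1 c2 : List Char) (k i j maxlen : Int)
    (hi : 0 ≤ i) (hj : 0 ≤ j)
    (hm : maxlen = min ((c1.length : Int) - i) ((c2.length : Int) - j)) :
    ∀ (fuel : Nat) (l mism : Int), 0 ≤ l → l ≤ maxlen → fuel = (maxlen - l).toNat →
    pvWhileA c1 c2 k mism l i j maxlen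
      = l + (pvG ((c1.drop (i + l).toNat).zip (c2.drop (j + l).toNat)) (k - mism).toNat : Int) := by
  intro fuel
  induction fuel with
  | zero =>
    intro l mism h0 hle hf
    have hl : l = maxlen := by omega
    rw [pvWhileA]
    rw [dif_neg (by omega)]
    have hz : ((c1.drop (i + l).toNat).zip (c2.drop (j + l).toNat)) = [] := by
      have : ((c1.drop (i + l).toNat).zip (c2.drop (j + l).toNat)).length = 0 := by
        rw [List.length_zip, List.length_drop, List.length_drop]
        omega
      exact List.eq_nil_of_length_eq_zero this
    rw [hz]
    simp [pvG]
  | succ fuel ih =>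
    intro l mism h0 hle hf
    have hlt : l < maxlen := by omega
    have hc1 : (i + l).toNat < c1.length := by omega
    have hc2 : (j + l).toNat < c2.length := by omega
    rw [pvWhileA, dif_pos hlt]
    rw [List.drop_eq_getElem_cons hc1, List.drop_eq_getElem_cons hc2, List.zip_cons_cons]
    rw [PySem.List.pyGetD_eq_getElem c1 ' ' (by omega) (by omega),
        PySem.List.pyGetD_eq_getElem c2 ' ' (by omega) (by omega)]
    have hd1 : (i + l).toNat + 1 = (i + (l + 1)).toNat := by omega
    have hd2 : (j + l).toNat + 1 = (j + (l + 1)).toNat := by omega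
    by_cases hne : c1[(i + l).toNat] = c2[(j + l).toNat]
    · rw [if_neg (by simpa using hne)]
      rw [ih (l + 1) mism (by omega) (by omega) (by omega)]
      simp only [pvG, if_pos hne, hd1, hd2]
      push_cast
      ring
    · rw [if_pos (by simpa using hne)]
      by_cases hbreak : mism + 1 > k
      · rw [if_pos hbreak]
        have hb : (k - mism).toNat = 0 := by omega
        simp [pvG, hne, hb]
      · rw [if_neg hbreak]
        rw [ih (l + 1) (mism + 1) (by omega) (by omega) (by omega)]
        have hb : (k - mism).toNat = (k - (mism + 1)).toNat + 1 := by omega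
        simp only [pvG, if_neg hne, hb, hd1, hd2]
        push_cast
        ring

theorem pvBuildFold_eq (c1 c2 : List Char) (i0 j0 L : Int) (h0 : 0 ≤ i0) (h1 : 0 ≤ j0)
    (hL : L = min ((c1.length : Int) - i0) ((c2.length : Int) - j0)) :
    ∀ (fuel : Nat) (p : Int) (M C : List Int) (c : Int), 0 ≤ p → p ≤ L → fuel = (L - p).toNat →
    (PySem.List.pyRange p L 1).foldl (fun (s : List Int × List Int × Int) q =>
        if PySem.List.pyGetD c1 (i0 + q) ' ' ≠ PySem.List.pyGetD c2 (j0 + q) ' ' then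
          (s.1 ++ [q], s.2.1 ++ [s.2.2 + 1], s.2.2 + 1)
        else (s.1, s.2.1 ++ [s.2.2], s.2.2)) (M, C, c)
      = (M ++ pvOffs ((c1.drop (i0 + p).toNat).zip (c2.drop (j0 + p).toNat)) p,
         C ++ pvPC ((c1.drop (i0 + p).toNat).zip (c2.drop (j0 + p).toNat)) c,
         c + (pvCnt ((c1.drop (i0 + p).toNat).zip (c2.drop (j0 + p).toNat)) : Int)) := by
  intro fuel
  induction fuel with
  | zero =>
    intro p M C c hp0 hpL hf
    have hz : ((c1.drop (i0 + p).toNat).zip (c2.drop (j0 + p).toNat)) = [] := by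
      apply List.eq_nil_of_length_eq_zero
      rw [List.length_zip, List.length_drop, List.length_drop]
      omega
    rw [PySem.List.pyRange_one_eq_nil (by omega), hz]
    simp [pvOffs, pvPC, pvCnt]
  | succ fuel ih =>
    intro p M C c hp0 hpL hf
    have hplt : p < L := by omega
    have hc1 : (i0 + p).toNat < c1.length := by omega
    have hc2 : (j0 + p).toNat < c2.length := by omega
    rw [PySem.List.pyRange_one_cons hplt, List.foldl_cons]
    rw [List.drop_eq_getElem_cons hc1, List.drop_eq_getElem_cons hc2, List.zip_cons_cons]
    have hd1 : (i0 + p).toNat + 1 = (i0 + (p + 1)).toNat := by omega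
    have hd2 : (j0 + p).toNat + 1 = (j0 + (p + 1)).toNat := by omega
    rw [PySem.List.pyGetD_eq_getElem c1 ' ' (by omega) (by omega),
        PySem.List.pyGetD_eq_getElem c2 ' ' (by omega) (by omega)]
    by_cases hne : c1[(i0 + p).toNat] = c2[(j0 + p).toNat]
    · rw [if_neg (by simpa using hne)]
      rw [ih (p + 1) M (C ++ [c]) c (by omega) (by omega) (by omega)]
      simp only [pvOffs, pvPC, pvCnt, if_pos hne, List.countP_cons, hd1, hd2]
      simp [hne, List.append_assoc]
    · rw [if_pos (by simpa using hne)]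
      rw [ih (p + 1) (M ++ [p]) (C ++ [c + 1]) (c + 1) (by omega) (by omega) (by omega)]
      simp only [pvOffs, pvPC, pvCnt, if_neg hne, List.countP_cons, hd1, hd2]
      simp [hne, List.append_assoc]
      push_cast
      ring

-- the value pvBuildDiag stores at key d
def pvDiagVal (c1 c2 : List Char) (d : Int) : List Int × List Int :=
  let i0 : Int := if d ≥ 0 then d else 0
  let j0 : Int := if d ≥ 0 then 0 else -d
  let L := min ((c1.length : Int) - i0) ((c2.length : Int) - j0)
  let mcc := (PySem.List.pyRange 0 L 1).foldl (fun (s : List Int × List Int × Int) p =>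
    if PySem.List.pyGetD c1 (i0 + p) ' ' ≠ PySem.List.pyGetD c2 (j0 + p) ' ' then
      (s.1 ++ [p], s.2.1 ++ [s.2.2 + 1], s.2.2 + 1)
    else (s.1, s.2.1 ++ [s.2.2], s.2.2)) ([], [0], 0)
  (mcc.1, mcc.2.1)

theorem pvBuildDiag_items (c1 c2 : List Char) :
    (pvBuildDiag c1 c2).items
      = (PySem.List.pyRange (-(c2.length : Int) + 1) c1.length 1).map
          (fun d => (d, pvDiagVal c1 c2 d)) := by
  unfold pvBuildDiag
  have := PySem.Dict.items_foldl_insert_fresh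
    (PySem.List.pyRange (-(c2.length : Int) + 1) c1.length 1) (fun a => a)
    (fun a => pvDiagVal c1 c2 a) PySem.Dict.empty
    (by intro a _; simp) (by simpa using PySem.List.nodup_pyRange_one _ _)
  simpa [pvDiagVal] using this

theorem pvBuildDiag_nodup_keys (c1 c2 : List Char) : (pvBuildDiag c1 c2).keys.Nodup := by
  unfold pvBuildDiag
  exact PySem.Dict.nodup_keys_foldl_insert _ (fun dd x => pvDiagVal c1 c2 x) _
    (by simp [PySem.Dict.keys_empty])

theorem pvBuildDiag_getD (c1 c2 : List Char) (d : Int)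
    (h1 : -(c2.length : Int) + 1 ≤ d) (h2 : d < (c1.length : Int)) :
    (pvBuildDiag c1 c2).getD d ([], [])
      = (pvOffs ((c1.drop (if d ≥ 0 then d else 0).toNat).zip
                 (c2.drop (if d ≥ 0 then 0 else -d).toNat)) 0,
         0 :: pvPC ((c1.drop (if d ≥ 0 then d else 0).toNat).zip
                    (c2.drop (if d ≥ 0 then 0 else -d).toNat)) 0) := by
  have hmem : (d, pvDiagVal c1 c2 d) ∈ (pvBuildDiag c1 c2).items := by
    rw [pvBuildDiag_items]
    exact List.mem_map.mpr ⟨d, PySem.List.mem_pyRange_one.mpr ⟨h1, h2⟩, rfl⟩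
  rw [PySem.Dict.getD_of_mem_items _ hmem (pvBuildDiag_nodup_keys c1 c2)]
  show (let i0 : Int := if d ≥ 0 then d else 0
        let j0 : Int := if d ≥ 0 then 0 else -d
        let L := min ((c1.length : Int) - i0) ((c2.length : Int) - j0)
        let mcc := (PySem.List.pyRange 0 L 1).foldl (fun (s : List Int × List Int × Int) p =>
          if PySem.List.pyGetD c1 (i0 + p) ' ' ≠ PySem.List.pyGetD c2 (j0 + p) ' ' then
            (s.1 ++ [p], s.2.1 ++ [s.2.2 + 1], s.2.2 + 1)
          else (s.1, s.2.1 ++ [s.2.2], s.2.2)) ([], [0], 0)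
        (mcc.1, mcc.2.1)) = _
  simp only []
  have hi0 : (0 : Int) ≤ (if d ≥ 0 then d else 0) := by split <;> omega
  have hj0 : (0 : Int) ≤ (if d ≥ 0 then 0 else -d) := by split <;> omega
  have hL0 : (0 : Int) ≤ min ((c1.length : Int) - (if d ≥ 0 then d else 0))
      ((c2.length : Int) - (if d ≥ 0 then 0 else -d)) := by
    by_cases hd : d ≥ 0
    · rw [if_pos hd, if_pos hd]; omega
    · rw [if_neg hd, if_neg hd]; omega
  rw [pvBuildFold_eq c1 c2 _ _ _ hi0 hj0 rfl
      (min ((c1.length : Int) - (if d ≥ 0 then d else 0))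
           ((c2.length : Int) - (if d ≥ 0 then 0 else -d))).toNat
      0 [] [0] 0 le_rfl hL0 (by omega)]
  simp

-- the value both inner loop bodies compute, in terms of pvG / pvCnt
def pvCanon (s1 s2 : String) (k tau : Int) (i j : Int)
    (acc : List (Int × Int × Int × String × String)) : List (Int × Int × Int × String × String) :=
  let z := (s1.toList.drop i.toNat).zip (s2.toList.drop j.toNat)
  let l : Int := (pvG z k.toNat : Int)
  let m : Int := (min k.toNat (pvCnt z) : Int)
  if l < tau then acc
  else if decide (0 < i) && decide (0 < j) &&
        decide (m + (if PySem.List.pyGetD s1.toList (i - 1) ' ' ≠ PySem.List.pyGetD s2.toList (j - 1) ' '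
                     then (1 : Int) else 0) ≤ k) then acc
  else acc ++ [(i, j, l, PySem.Str.slice s1 (some i) (some (i + l)),
                         PySem.Str.slice s2 (some j) (some (j + l)))]

theorem pvOffs_getElem (z : List (Char × Char)) (q : Int) (n : Nat) (h : n < pvCnt z)
    (h2 : n < (pvOffs z q).length) : (pvOffs z q)[n] = q + (pvG z n : Int) := by
  have := pvOffs_getElem? z q n h
  rw [List.getElem?_eq_getElem h2] at this
  exact Option.some.inj this

theorem pvPC_getElem (z : List (Char × Char)) (c : Int) (t : Nat) (h : t < z.length)
    (h2 : t < (pvPC z c).length) : (pvPC z c)[t] = c + (pvCnt (z.take (t + 1)) : Int) := by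
  have := pvPC_getElem? z c t h
  rw [List.getElem?_eq_getElem h2] at this
  exact Option.some.inj this

theorem pv_stepB_core (s1 s2 : String) (k tau i j i0 j0 t : Int)
    (acc : List (Int × Int × Int × String × String))
    (hi0 : 0 ≤ i0) (hj0 : 0 ≤ j0) (ht0 : 0 ≤ t)
    (hit : i0 + t = i) (hjt : j0 + t = j)
    (hi2 : i < (s1.toList.length : Int)) (hj2 : j < (s2.toList.length : Int)) :
    (let c1 := s1.toList
     let c2 := s2.toList
     let M := pvOffs ((c1.drop i0.toNat).zip (c2.drop j0.toNat)) 0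
     let C := 0 :: pvPC ((c1.drop i0.toNat).zip (c2.drop j0.toNat)) 0
     let kk : Int := if k > 0 then k else 0
     let L : Int := (C.length : Int) - 1
     let idx := PySem.List.pyGetD C t 0
     let lm : Int × Int :=
       if idx + kk < (M.length : Int) then (PySem.List.pyGetD M (idx + kk) 0 - t, kk)
       else (L - t, (M.length : Int) - idx)
     if lm.1 < tau then acc
     else if decide (0 < i) && decide (0 < j) &&
           decide (lm.2 + (if PySem.List.pyGetD c1 (i - 1) ' ' ≠ PySem.List.pyGetD c2 (j - 1) ' '
                           then (1 : Int) else 0) ≤ k) then acc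
     else acc ++ [(i, j, lm.1, PySem.Str.slice s1 (some i) (some (i + lm.1)),
                               PySem.Str.slice s2 (some j) (some (j + lm.1)))])
    = pvCanon s1 s2 k tau i j acc := by
  dsimp only
  set c1 := s1.toList with hc1
  set c2 := s2.toList with hc2
  set zd := (c1.drop i0.toNat).zip (c2.drop j0.toNat) with hzd
  set z := (c1.drop i.toNat).zip (c2.drop j.toNat) with hz
  have hzdlen : zd.length = min (c1.length - i0.toNat) (c2.length - j0.toNat) := by
    rw [hzd, List.length_zip, List.length_drop, List.length_drop]
  have hdz : zd.drop t.toNat = z := by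
    rw [hzd, hz, pv_zip_drop, List.drop_drop, List.drop_drop]
    congr 2 <;> omega
  have htlt : t.toNat < zd.length := by
    rw [hzdlen]; omega
  have hsplit : zd.take t.toNat ++ z = zd := by
    rw [← hdz, List.take_append_drop]
  have hzlen : z.length = zd.length - t.toNat := by
    rw [← hdz, List.length_drop]
  have hcnts : pvCnt (zd.take t.toNat) + pvCnt z = pvCnt zd := by
    unfold pvCnt
    rw [← List.countP_append, hsplit]
  have hkk : (if k > 0 then k else 0) = (k.toNat : Int) := by split <;> omega
  have hoptC : (0 :: pvPC zd 0)[t.toNat]? = some ((pvCnt (zd.take t.toNat) : Int)) := by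
    cases htn : t.toNat with
    | zero => simp [pvCnt]
    | succ m =>
      rw [List.getElem?_cons_succ, pvPC_getElem? zd 0 m (by omega)]
      rw [← htn]
      simp
  have hidx : PySem.List.pyGetD (0 :: pvPC zd 0) t 0 = (pvCnt (zd.take t.toNat) : Int) := by
    rw [PySem.List.pyGetD_eq_getElem _ _ ht0
      (by simp only [List.length_cons, pvPC_length]; push_cast; omega)]
    rw [List.getElem?_eq_getElem
      (by simp only [List.length_cons, pvPC_length]; omega)] at hoptC
    exact Option.some.inj hoptC
  have hMlen : (pvOffs zd 0).length = pvCnt zd := pvOffs_length zd 0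
  have hlm : (if PySem.List.pyGetD (0 :: pvPC zd 0) t 0 + (if k > 0 then k else 0)
                  < ((pvOffs zd 0).length : Int)
              then (PySem.List.pyGetD (pvOffs zd 0)
                      (PySem.List.pyGetD (0 :: pvPC zd 0) t 0 + (if k > 0 then k else 0)) 0 - t,
                    if k > 0 then k else 0)
              else (((0 :: pvPC zd 0).length : Int) - 1 - t,
                    ((pvOffs zd 0).length : Int) - PySem.List.pyGetD (0 :: pvPC zd 0) t 0))
      = ((pvG z k.toNat : Int), (min k.toNat (pvCnt z) : Int)) := by
    rw [hidx, hkk, hMlen]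
    by_cases hbr : k.toNat < pvCnt z
    · rw [if_pos (by push_cast; omega)]
      have hoffs : pvOffs zd 0 = pvOffs (zd.take t.toNat) 0 ++ pvOffs z t := by
        conv_lhs => rw [← hsplit]
        rw [pvOffs_append]
        congr 2
        rw [List.length_take_of_le (by omega)]
        omega
      have hopt2 : (pvOffs zd 0)[pvCnt (zd.take t.toNat) + k.toNat]?
          = some (t + (pvG z k.toNat : Int)) := by
        rw [hoffs, List.getElem?_append_right (by rw [pvOffs_length]; omega)]
        rw [pvOffs_length]
        have he : pvCnt (zd.take t.toNat) + k.toNat - pvCnt (zd.take t.toNat) = k.toNat := by omega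
        rw [he]
        exact pvOffs_getElem? z t _ (by omega)
      have hgl : PySem.List.pyGetD (pvOffs zd 0)
          ((pvCnt (zd.take t.toNat) : Int) + (k.toNat : Int)) 0 = t + (pvG z k.toNat : Int) := by
        have hcast : (pvCnt (zd.take t.toNat) : Int) + (k.toNat : Int)
            = ((pvCnt (zd.take t.toNat) + k.toNat : Nat) : Int) := by push_cast; ring
        rw [hcast, PySem.List.pyGetD_natCast, List.getD_eq_getElem?_getD, hopt2]
        rfl
      rw [hgl]
      simp only [Prod.mk.injEq]
      refine ⟨by omega, ?_⟩
      rw [min_eq_left (by omega)]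
    · rw [if_neg (by push_cast; omega)]
      have hge : pvG z k.toNat = z.length := pvG_of_cnt_le z k.toNat (by omega)
      rw [hge]
      simp only [Prod.mk.injEq]
      constructor
      · simp only [List.length_cons, pvPC_length]
        push_cast
        omega
      · rw [min_eq_right (by omega)]
        push_cast
        omega
  rw [hlm]
  unfold pvCanon
  rfl
theorem pv_stepA_eq (s1 s2 : String) (k tau : Int) (i j : Int)
    (hi : 0 ≤ i) (hi2 : i < (s1.toList.length : Int))
    (hj : 0 ≤ j) (hj2 : j < (s2.toList.length : Int))
    (acc : List (Int × Int × Int × String × String)) :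
    (let c1 := s1.toList
     let c2 := s2.toList
     let len1 : Int := c1.length
     let len2 : Int := c2.length
     let maxLen := min (len1 - i) (len2 - j)
     let l := pvWhileA c1 c2 k 0 0 i j maxLen
     if l < tau then acc
     else
       let leftMismatch := decide (0 < i) && decide (0 < j) &&
         decide (pvHamming (PySem.Str.slice s1 (some (i - 1)) (some (i + l)))
                           (PySem.Str.slice s2 (some (j - 1)) (some (j + l))) ≤ k)
       let rightMismatch := decide (i + l < len1) && decide (j + l < len2) &&
         decide (pvHamming (PySem.Str.slice s1 (some i) (some (i + l + 1)))
                           (PySem.Str.slice s2 (some j) (some (j + l + 1))) ≤ k)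
       if !leftMismatch && !rightMismatch then
         acc ++ [(i, j, l, PySem.Str.slice s1 (some i) (some (i + l)),
                           PySem.Str.slice s2 (some j) (some (j + l)))]
       else acc)
    = pvCanon s1 s2 k tau i j acc := by
  dsimp only
  set c1 := s1.toList with hc1
  set c2 := s2.toList with hc2
  set z := (c1.drop i.toNat).zip (c2.drop j.toNat) with hz
  have hzlen : z.length = min (c1.length - i.toNat) (c2.length - j.toNat) := by
    rw [hz, List.length_zip, List.length_drop, List.length_drop]
  have hwhile : pvWhileA c1 c2 k 0 0 i j (min ((c1.length : Int) - i) ((c2.length : Int) - j))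
      = (pvG z k.toNat : Int) := by
    rw [pvWhileA_eq c1 c2 k i j _ hi hj rfl
      (min ((c1.length : Int) - i) ((c2.length : Int) - j)).toNat 0 0 le_rfl (by omega) (by omega)]
    simp only [add_zero, sub_zero, zero_add]
    rw [← hz]
  rw [hwhile]
  set lN := pvG z k.toNat with hlN
  have hlNle : lN ≤ z.length := pvG_le_length z k.toNat
  have hslice : ∀ (s : String) (a b : Int), 0 ≤ a → 0 ≤ b →
      (PySem.Str.slice s (some a) (some b)).toList = (s.toList.drop a.toNat).take (b.toNat - a.toNat) := by
    intro s a b ha hb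
    have : (PySem.Str.slice s (some a) (some b)).toList = PySem.List.slice s.toList (some a) (some b) := by
      simp [PySem.Str.slice]
    rw [this, PySem.List.slice_toNat _ ha hb]
  have hR : (decide (i + (lN : Int) < (c1.length : Int)) && decide (j + (lN : Int) < (c2.length : Int)) &&
      decide (pvHamming (PySem.Str.slice s1 (some i) (some (i + (lN : Int) + 1)))
                        (PySem.Str.slice s2 (some j) (some (j + (lN : Int) + 1))) ≤ k)) = false := by
    by_cases hb1 : i + (lN : Int) < (c1.length : Int)
    · by_cases hb2 : j + (lN : Int) < (c2.length : Int)
      · have hbr : k.toNat < pvCnt z := by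
          by_contra hc
          have := pvG_of_cnt_le z k.toNat (by omega)
          rw [← hlN] at this
          omega
        have hham2 : pvHamming (PySem.Str.slice s1 (some i) (some (i + (lN : Int) + 1)))
            (PySem.Str.slice s2 (some j) (some (j + (lN : Int) + 1))) = ((k.toNat + 1 : Nat) : Int) := by
          rw [pvHamming_eq, hslice s1 _ _ (by omega) (by omega), hslice s2 _ _ (by omega) (by omega)]
          have e1 : (i + (lN : Int) + 1).toNat - i.toNat = lN + 1 := by omega
          have e2 : (j + (lN : Int) + 1).toNat - j.toNat = lN + 1 := by omega
          rw [e1, e2, ← pv_zip_take, ← hz]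
          rw [hlN, pvCnt_take_pvG_succ z k.toNat hbr]
        rw [hham2]
        simp only [hb1, hb2, decide_true, Bool.true_and]
        simp only [decide_eq_false_iff_not]
        omega
      · simp [hb2]
    · simp [hb1]
  have hL : (decide (0 < i) && decide (0 < j) &&
      decide (pvHamming (PySem.Str.slice s1 (some (i - 1)) (some (i + (lN : Int))))
                        (PySem.Str.slice s2 (some (j - 1)) (some (j + (lN : Int)))) ≤ k))
      = (decide (0 < i) && decide (0 < j) &&
      decide ((min k.toNat (pvCnt z) : Int) +
        (if PySem.List.pyGetD c1 (i - 1) ' ' ≠ PySem.List.pyGetD c2 (j - 1) ' '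
         then (1 : Int) else 0) ≤ k)) := by
    by_cases hpi : 0 < i
    · by_cases hpj : 0 < j
      · have hham : pvHamming (PySem.Str.slice s1 (some (i - 1)) (some (i + (lN : Int))))
            (PySem.Str.slice s2 (some (j - 1)) (some (j + (lN : Int))))
            = (min k.toNat (pvCnt z) : Int) +
              (if PySem.List.pyGetD c1 (i - 1) ' ' ≠ PySem.List.pyGetD c2 (j - 1) ' '
               then (1 : Int) else 0) := by
          rw [pvHamming_eq, hslice s1 _ _ (by omega) (by omega), hslice s2 _ _ (by omega) (by omega)]
          have e1 : (i + (lN : Int)).toNat - (i - 1).toNat = lN + 1 := by omega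
          have e2 : (j + (lN : Int)).toNat - (j - 1).toNat = lN + 1 := by omega
          rw [e1, e2]
          rw [List.drop_eq_getElem_cons (show (i - 1).toNat < c1.length by omega),
              List.drop_eq_getElem_cons (show (j - 1).toNat < c2.length by omega)]
          have e3 : (i - 1).toNat + 1 = i.toNat := by omega
          have e4 : (j - 1).toNat + 1 = j.toNat := by omega
          rw [e3, e4, List.take_succ_cons, List.take_succ_cons, List.zip_cons_cons,
              ← pv_zip_take, ← hz]
          unfold pvCnt
          rw [List.countP_cons]
          have e5 : List.countP (fun p => !decide (p.1 = p.2)) (z.take lN)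
              = min k.toNat (pvCnt z) := by
            rw [hlN]
            exact pvCnt_take_pvG z k.toNat
          rw [e5]
          rw [PySem.List.pyGetD_eq_getElem c1 ' ' (by omega) (by omega),
              PySem.List.pyGetD_eq_getElem c2 ' ' (by omega) (by omega)]
          by_cases he : c1[(i - 1).toNat] = c2[(j - 1).toNat]
          · simp [pvCnt, he]
          · simp [pvCnt, he]
        rw [hham]
      · simp [hpj]
    · simp [hpi]
  rw [hR, hL]
  unfold pvCanon
  dsimp only
  rw [← hc1, ← hc2, ← hz, ← hlN]
  by_cases htau : (lN : Int) < tau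
  · rw [if_pos htau, if_pos htau]
  · rw [if_neg htau, if_neg htau]
    cases hLv : (decide (0 < i) && decide (0 < j) &&
      decide ((min k.toNat (pvCnt z) : Int) +
        (if PySem.List.pyGetD c1 (i - 1) ' ' ≠ PySem.List.pyGetD c2 (j - 1) ' '
         then (1 : Int) else 0) ≤ k)) <;> simp

theorem pv_step_eq (s1 s2 : String) (k tau : Int) (i j : Int)
    (hi : 0 ≤ i) (hi2 : i < (s1.toList.length : Int))
    (hj : 0 ≤ j) (hj2 : j < (s2.toList.length : Int))
    (acc : List (Int × Int × Int × String × String)) :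
    (let c1 := s1.toList
     let c2 := s2.toList
     let len1 : Int := c1.length
     let len2 : Int := c2.length
     let maxLen := min (len1 - i) (len2 - j)
     let l := pvWhileA c1 c2 k 0 0 i j maxLen
     if l < tau then acc
     else
       let leftMismatch := decide (0 < i) && decide (0 < j) &&
         decide (pvHamming (PySem.Str.slice s1 (some (i - 1)) (some (i + l)))
                           (PySem.Str.slice s2 (some (j - 1)) (some (j + l))) ≤ k)
       let rightMismatch := decide (i + l < len1) && decide (j + l < len2) &&
         decide (pvHamming (PySem.Str.slice s1 (some i) (some (i + l + 1)))
                           (PySem.Str.slice s2 (some j) (some (j + l + 1))) ≤ k)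
       if !leftMismatch && !rightMismatch then
         acc ++ [(i, j, l, PySem.Str.slice s1 (some i) (some (i + l)),
                           PySem.Str.slice s2 (some j) (some (j + l)))]
       else acc)
    =
    (let c1 := s1.toList
     let c2 := s2.toList
     let kk : Int := if k > 0 then k else 0
     let diag := pvBuildDiag c1 c2
     let t : Int := if i - j ≥ 0 then j else i
     let MC := diag.getD (i - j) ([], [])
     let L : Int := (MC.2.length : Int) - 1
     let idx := PySem.List.pyGetD MC.2 t 0
     let lm : Int × Int :=
       if idx + kk < (MC.1.length : Int) then (PySem.List.pyGetD MC.1 (idx + kk) 0 - t, kk)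
       else (L - t, (MC.1.length : Int) - idx)
     if lm.1 < tau then acc
     else if decide (0 < i) && decide (0 < j) &&
           decide (lm.2 + (if PySem.List.pyGetD c1 (i - 1) ' ' ≠ PySem.List.pyGetD c2 (j - 1) ' '
                           then (1 : Int) else 0) ≤ k) then acc
     else
       acc ++ [(i, j, lm.1, PySem.Str.slice s1 (some i) (some (i + lm.1)),
                            PySem.Str.slice s2 (some j) (some (j + lm.1)))]) := by
  trans (pvCanon s1 s2 k tau i j acc)
  · exact pv_stepA_eq s1 s2 k tau i j hi hi2 hj hj2 acc
  · have h1 : -(s2.toList.length : Int) + 1 ≤ i - j := by omega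
    have h2 : i - j < (s1.toList.length : Int) := by omega
    symm
    dsimp only
    rw [pvBuildDiag_getD _ _ _ h1 h2]
    by_cases hd : i - j ≥ 0
    · simp only [if_pos hd]
      exact pv_stepB_core s1 s2 k tau i j (i - j) 0 j acc (by omega) le_rfl hj
        (by omega) (by omega) hi2 hj2
    · simp only [if_neg hd]
      exact pv_stepB_core s1 s2 k tau i j 0 (-(i - j)) i acc le_rfl (by omega) hi
        (by omega) (by omega) hi2 hj2

-- ===== VERDICT (by name: the statement is the Claim_ definition above) =====
theorem find_maximal_common_substrings_spec : Claim_equal_find_maximal_common_substrings := by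
  intro s1 s2 k tau _
  unfold Spec_find_maximal_common_substrings
  unfold find_maximal_common_substrings find_maximal_common_substrings_alt
  apply PySem.List.foldl_congr_mem
  intro acc i hi
  apply PySem.List.foldl_congr_mem
  intro acc j hj
  rw [PySem.List.mem_pyRange_one] at hi hj
  exact pv_step_eq s1 s2 k tau i j hi.1 hi.2 hj.1 hj.2 acc
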